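-- pv_equiv track=rewrite | github.com/rovikrobert/warmpath-agents | agents/shared/message_formatter.py | execution_summary
-- ===== SOURCE A (Python) =====
-- def execution_summary(
--
--     events: list[dict[str, str]],
-- ) -> str:
--     """Format autonomous execution events for the daily brief."""
--     if not events:
--         return "No autonomous actions overnight."
--
--     auto_fixed = [e for e in events if e.get("action") == "auto_fixed"]
--     prs = [e for e in events if e.get("action") == "pr_created"]
--     escalated = [e for e in events if e.get("action") == "escalated"]
--
--     lines = ["Autonomous Actions:"]
--     if auto_fixed:
--         lines.append(f"  Auto-fixed: {len(auto_fixed)}")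
--         for e in auto_fixed[:3]:
--             lines.append(f"    - {e.get('detail', '?')}")
--     if prs:
--         lines.append(f"  PRs opened: {len(prs)}")
--         for e in prs[:3]:
--             pr_url = e.get("pr_url", "")
--             lines.append(f"    - {e.get('detail', '?')} {pr_url}")
--     if escalated:
--         lines.append(f"  Escalated: {len(escalated)}")
--         for e in escalated[:3]:
--             lines.append(f"    - {e.get('detail', '?')}")
--
--     return "\n".join(lines)
-- ===== SOURCE B (Python) =====
-- _RANK = {"auto_fixed": 0, "pr_created": 1, "escalated": 2}
-- _HEAD = ["  Auto-fixed: ", "  PRs opened: ", "  Escalated: "]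
--
--
-- def execution_summary(
--     events: list[dict[str, str]],
-- ) -> str:
--     """Sort recognized events by an action rank, then emit one section per run of equal ranks."""
--     if not events:
--         return "No autonomous actions overnight."
--
--     ranked = sorted(
--         [e for e in events if e.get("action") in _RANK],
--         key=lambda e: _RANK[e.get("action")],
--     )
--
--     lines = ["Autonomous Actions:"]
--     while ranked:
--         r = _RANK[ranked[0].get("action")]
--         k = 1
--         while k < len(ranked) and _RANK[ranked[k].get("action")] == r:
--             k += 1
--         run, ranked = ranked[:k], ranked[k:]
--         lines.append(_HEAD[r] + str(len(run)))
--         for e in run[:3]: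
--             if r == 1:
--                 lines.append("    - " + e.get("detail", "?") + " " + e.get("pr_url", ""))
--             else:
--                 lines.append("    - " + e.get("detail", "?"))
--     return "\n".join(lines)
-- ===== Notes on version B (the rewrite author's own statement) =====
-- stated objective: alternative
-- what changed: B replaces A's three per-action filter passes and hard-coded section blocks by a sort-then-scan algorithm: it maps each recognized action to a numeric rank, stably sorts the relevant events by rank, and then scans the sorted list once, emitting one section per maximal run of equal ranks with the header taken from a rank-indexed table; stability of the sort preserves A's per-action encounter order and the rank order reproduces A's fixed section order.
import Mathlib
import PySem

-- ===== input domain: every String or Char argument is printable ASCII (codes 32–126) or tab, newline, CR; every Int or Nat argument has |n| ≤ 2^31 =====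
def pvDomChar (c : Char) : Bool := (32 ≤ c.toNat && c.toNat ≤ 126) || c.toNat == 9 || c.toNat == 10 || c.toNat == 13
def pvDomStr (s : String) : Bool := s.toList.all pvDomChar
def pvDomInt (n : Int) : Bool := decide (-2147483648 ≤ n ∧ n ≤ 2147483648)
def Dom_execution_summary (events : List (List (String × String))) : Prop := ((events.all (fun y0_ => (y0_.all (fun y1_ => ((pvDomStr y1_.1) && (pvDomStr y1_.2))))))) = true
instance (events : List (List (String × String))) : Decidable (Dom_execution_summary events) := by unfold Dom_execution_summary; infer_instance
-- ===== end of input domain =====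

-- B replaces A's three filter passes + hard-coded sections by sort-by-rank then a one-pass run scan (alternative algorithm, not faster).

-- ===== PORT A =====
def execution_summary (events : List (List (String × String))) : String :=
  if events = [] then "No autonomous actions overnight."
  else
    let auto_fixed := events.filter (fun e => PySem.Dict.get? (PySem.Dict.mk e) "action" == some "auto_fixed")
    let prs := events.filter (fun e => PySem.Dict.get? (PySem.Dict.mk e) "action" == some "pr_created")
    let escalated := events.filter (fun e => PySem.Dict.get? (PySem.Dict.mk e) "action" == some "escalated")
    let lines : List String := ["Autonomous Actions:"]
    let lines := if auto_fixed ≠ [] then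
        lines ++ ("  Auto-fixed: " ++ PySem.Int.toStr (PySem.List.len auto_fixed)) ::
          (PySem.List.slice auto_fixed none (some 3)).map
            (fun e => "    - " ++ PySem.Dict.getD (PySem.Dict.mk e) "detail" "?")
      else lines
    let lines := if prs ≠ [] then
        lines ++ ("  PRs opened: " ++ PySem.Int.toStr (PySem.List.len prs)) ::
          (PySem.List.slice prs none (some 3)).map
            (fun e =>
              let pr_url := PySem.Dict.getD (PySem.Dict.mk e) "pr_url" ""
              "    - " ++ PySem.Dict.getD (PySem.Dict.mk e) "detail" "?" ++ " " ++ pr_url)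
      else lines
    let lines := if escalated ≠ [] then
        lines ++ ("  Escalated: " ++ PySem.Int.toStr (PySem.List.len escalated)) ::
          (PySem.List.slice escalated none (some 3)).map
            (fun e => "    - " ++ PySem.Dict.getD (PySem.Dict.mk e) "detail" "?")
      else lines
    PySem.Str.join "\n" lines

-- ===== PORT B =====
-- Source B's module constants _RANK and _HEAD
def pvRankDict : PySem.Dict String Int := PySem.Dict.mk [("auto_fixed", 0), ("pr_created", 1), ("escalated", 2)]
def pvHead : List String := ["  Auto-fixed: ", "  PRs opened: ", "  Escalated: "]

-- _RANK.get(e.get("action")): some rank iff e.get("action") is a key of _RANK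
def pvRank? (e : List (String × String)) : Option Int :=
  (PySem.Dict.get? (PySem.Dict.mk e) "action").bind (fun a => PySem.Dict.get? pvRankDict a)

-- the sort key lambda _RANK[e.get("action")] (only applied where the lookup succeeds)
def pvKey (e : List (String × String)) : Int := (pvRank? e).getD 0

-- one detail line of a run of rank r
def pvLine (r : Int) (e : List (String × String)) : String :=
  if r == 1 then
    "    - " ++ PySem.Dict.getD (PySem.Dict.mk e) "detail" "?" ++ " " ++ PySem.Dict.getD (PySem.Dict.mk e) "pr_url" ""
  else
    "    - " ++ PySem.Dict.getD (PySem.Dict.mk e) "detail" "?"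

-- Source B's while-loop: consume one maximal run of equal ranks per iteration
def pvScan : List (List (String × String)) → List String
  | [] => []
  | e :: t =>
    let r := pvKey e
    let run := e :: t.takeWhile (fun x => pvKey x == r)
    let rest := t.dropWhile (fun x => pvKey x == r)
    (((PySem.List.pyGet? pvHead r).getD "" ++ PySem.Int.toStr (PySem.List.len run)) ::
      (PySem.List.slice run none (some 3)).map (pvLine r)) ++ pvScan rest
  termination_by l => l.length
  decreasing_by
    have := List.length_dropWhile_le (fun x => pvKey x == r) t
    simp; omega

def execution_summary_alt (events : List (List (String × String))) : String :=
  if events = [] then "No autonomous actions overnight."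
  else
    let ranked := PySem.List.sorted (events.filter (fun e => (pvRank? e).isSome)) pvKey
    PySem.Str.join "\n" ("Autonomous Actions:" :: pvScan ranked)

-- ===== PRECONDITION & SPEC =====
def Spec_execution_summary (events : List (List (String × String))) (out : String) : Prop := out = execution_summary_alt events
instance (events : List (List (String × String))) (out : String) : Decidable (Spec_execution_summary events out) := by unfold Spec_execution_summary; infer_instance

-- ===== CLAIM (what is proved, stated in full; the proofs are below) =====
def Claim_equal_execution_summary : Prop := ∀ (events : List (List (String × String))), Dom_execution_summary events → Spec_execution_summary events (execution_summary events)

-- ===== LEMMAS AND PROOFS =====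

-- the literal rank dictionary, as an if-chain
lemma pv_beq_true {s a : String} (h : a = s) : (s == a) = true := by simp [h]

lemma pv_beq_false {s a : String} (h : ¬ a = s) : (s == a) = false := by
  simp; exact fun hh => h hh.symm

lemma pv_rankDict_get (a : String) :
    PySem.Dict.get? pvRankDict a =
      if a = "auto_fixed" then some 0 else if a = "pr_created" then some 1
      else if a = "escalated" then some 2 else none := by
  simp only [pvRankDict, PySem.Dict.get?, List.find?]
  by_cases h1 : a = "auto_fixed"
  · rw [pv_beq_true h1]; simp [h1]
  · rw [pv_beq_false h1]
    by_cases h2 : a = "pr_created"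
    · rw [pv_beq_true h2]; simp [h2]
    · rw [pv_beq_false h2]
      by_cases h3 : a = "escalated"
      · rw [pv_beq_true h3]; simp [h3]
      · rw [pv_beq_false h3]; simp [h1, h2, h3]

lemma pv_rank_cases (e : List (String × String)) :
    pvRank? e = none ∨ pvRank? e = some 0 ∨ pvRank? e = some 1 ∨ pvRank? e = some 2 := by
  unfold pvRank?
  cases PySem.Dict.get? (PySem.Dict.mk e) "action" with
  | none => simp
  | some a => simp only [Option.bind_some, pv_rankDict_get]; split_ifs <;> simp

lemma pv_key_of_rank {e : List (String × String)} {i : Int} (h : pvRank? e = some i) : pvKey e = i := by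
  simp [pvKey, h]

-- rank-0/1/2 membership expressed through A's action tests
lemma pv_rank0_iff (e : List (String × String)) :
    (pvRank? e = some 0) ↔ PySem.Dict.get? (PySem.Dict.mk e) "action" = some "auto_fixed" := by
  unfold pvRank?
  cases PySem.Dict.get? (PySem.Dict.mk e) "action" with
  | none => simp
  | some a => simp only [Option.bind_some, pv_rankDict_get]; split_ifs with h1 h2 h3 <;> simp_all

lemma pv_rank1_iff (e : List (String × String)) :
    (pvRank? e = some 1) ↔ PySem.Dict.get? (PySem.Dict.mk e) "action" = some "pr_created" := by
  unfold pvRank?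
  cases PySem.Dict.get? (PySem.Dict.mk e) "action" with
  | none => simp
  | some a => simp only [Option.bind_some, pv_rankDict_get]; split_ifs with h1 h2 h3 <;> simp_all

lemma pv_rank2_iff (e : List (String × String)) :
    (pvRank? e = some 2) ↔ PySem.Dict.get? (PySem.Dict.mk e) "action" = some "escalated" := by
  unfold pvRank?
  cases PySem.Dict.get? (PySem.Dict.mk e) "action" with
  | none => simp
  | some a => simp only [Option.bind_some, pv_rankDict_get]; split_ifs with h1 h2 h3 <;> simp_all

-- insertBy placement: inserted in front of a list it is strictly before
lemma pv_insertBy_front {α : Type} (before : α → α → Bool) (x : α) (m : List α)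
    (h : ∀ y ∈ m, before x y = true) :
    PySem.List.insertBy before x m = x :: m := by
  cases m with
  | nil => simp [PySem.List.insertBy]
  | cons y t => simp [PySem.List.insertBy, h y (by simp)]

-- insertBy skips a prefix it is not before
lemma pv_insertBy_skip {α : Type} (before : α → α → Bool) (x : α) (l m : List α)
    (h : ∀ y ∈ l, before x y = false) :
    PySem.List.insertBy before x (l ++ m) = l ++ PySem.List.insertBy before x m := by
  induction l with
  | nil => simp
  | cons y t ih =>
    simp only [List.cons_append, PySem.List.insertBy, h y (by simp)]
    simp [ih (fun z hz => h z (by simp [hz]))]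

-- the insertion-sort fold keeps the three rank groups, appending each element to its group
lemma pv_fold_groups (es g0 g1 g2 : List (List (String × String)))
    (hes : ∀ e ∈ es, (pvRank? e).isSome)
    (h0 : ∀ e ∈ g0, pvRank? e = some 0) (h1 : ∀ e ∈ g1, pvRank? e = some 1)
    (h2 : ∀ e ∈ g2, pvRank? e = some 2) :
    es.foldl (fun acc x => PySem.List.insertBy (fun a b => decide (pvKey a < pvKey b)) x acc) (g0 ++ g1 ++ g2)
      = (g0 ++ es.filter (fun e => pvRank? e == some 0)) ++ (g1 ++ es.filter (fun e => pvRank? e == some 1))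
        ++ (g2 ++ es.filter (fun e => pvRank? e == some 2)) := by
  induction es generalizing g0 g1 g2 with
  | nil => simp
  | cons x es ih =>
    have hx := hes x (by simp)
    have hes' : ∀ e ∈ es, (pvRank? e).isSome := fun e he => hes e (by simp [he])
    rcases pv_rank_cases x with hr | hr | hr | hr
    · rw [hr] at hx; simp at hx
    · -- rank 0: appended at the end of g0
      have hins : PySem.List.insertBy (fun a b => decide (pvKey a < pvKey b)) x (g0 ++ g1 ++ g2)
          = (g0 ++ [x]) ++ g1 ++ g2 := by
        rw [List.append_assoc, pv_insertBy_skip _ _ _ _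
          (fun y hy => by simp [pv_key_of_rank (h0 y hy), pv_key_of_rank hr]),
          pv_insertBy_front _ _ _ (fun y hy => by
            rcases List.mem_append.mp hy with hy | hy
            · simp [pv_key_of_rank (h1 y hy), pv_key_of_rank hr]
            · simp [pv_key_of_rank (h2 y hy), pv_key_of_rank hr])]
        simp
      rw [List.foldl_cons, hins,
        ih (g0 ++ [x]) g1 g2 hes'
          (fun e he => by rcases List.mem_append.mp he with he | he
                          · exact h0 e he
                          · simp at he; simp [he, hr]) h1 h2]
      simp [hr]
    · -- rank 1: appended at the end of g1
      have hins : PySem.List.insertBy (fun a b => decide (pvKey a < pvKey b)) x (g0 ++ g1 ++ g2)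
          = g0 ++ (g1 ++ [x]) ++ g2 := by
        rw [pv_insertBy_skip _ _ (g0 ++ g1) g2
          (fun y hy => by
            rcases List.mem_append.mp hy with hy | hy
            · simp [pv_key_of_rank (h0 y hy), pv_key_of_rank hr]
            · simp [pv_key_of_rank (h1 y hy), pv_key_of_rank hr]),
          pv_insertBy_front _ _ _ (fun y hy => by
            simp [pv_key_of_rank (h2 y hy), pv_key_of_rank hr])]
        simp
      rw [List.foldl_cons, hins,
        ih g0 (g1 ++ [x]) g2 hes' h0
          (fun e he => by rcases List.mem_append.mp he with he | he
                          · exact h1 e he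
                          · simp at he; simp [he, hr]) h2]
      simp [hr]
    · -- rank 2: appended at the very end
      have hall : ∀ y ∈ g0 ++ g1 ++ g2, (fun a b => decide (pvKey a < pvKey b)) x y = false := by
        intro y hy
        rcases List.mem_append.mp hy with hy | hy
        · rcases List.mem_append.mp hy with hy | hy
          · simp [pv_key_of_rank (h0 y hy), pv_key_of_rank hr]
          · simp [pv_key_of_rank (h1 y hy), pv_key_of_rank hr]
        · simp [pv_key_of_rank (h2 y hy), pv_key_of_rank hr]
      rw [List.foldl_cons, PySem.List.insertBy_of_forall_not_before _ _ _ hall,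
        show (g0 ++ g1 ++ g2) ++ [x] = g0 ++ g1 ++ (g2 ++ [x]) by simp,
        ih g0 g1 (g2 ++ [x]) hes' h0 h1
          (fun e he => by rcases List.mem_append.mp he with he | he
                          · exact h2 e he
                          · simp at he; simp [he, hr])]
      simp [hr]

-- the sorted relevant events are exactly the three filtered groups in order
lemma pv_sorted_groups (events : List (List (String × String))) :
    PySem.List.sorted (events.filter (fun e => (pvRank? e).isSome)) pvKey
      = events.filter (fun e => pvRank? e == some 0) ++ events.filter (fun e => pvRank? e == some 1)
        ++ events.filter (fun e => pvRank? e == some 2) := by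
  rw [PySem.List.sorted_eq_foldl_insertBy]
  have := pv_fold_groups (events.filter (fun e => (pvRank? e).isSome)) [] [] []
    (fun e he => by simpa using (List.mem_filter.mp he).2) (by simp) (by simp) (by simp)
  simp only [List.nil_append] at this
  rw [this]
  congr 1
  · congr 1 <;> rw [List.filter_filter] <;> apply List.filter_congr <;> intro e _ <;>
      rcases pv_rank_cases e with h | h | h | h <;> simp [h]
  · rw [List.filter_filter]; apply List.filter_congr; intro e _
    rcases pv_rank_cases e with h | h | h | h <;> simp [h]

-- the section pvScan emits for one run
def pvSec (i : Int) (f : List (List (String × String))) : List String :=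
  ((PySem.List.pyGet? pvHead i).getD "" ++ PySem.Int.toStr (PySem.List.len f)) ::
    (PySem.List.slice f none (some 3)).map (pvLine i)

-- scanning a run: one section, then the rest
lemma pv_scan_run (f rest : List (List (String × String))) (i : Int) (hf : f ≠ [])
    (hfi : ∀ e ∈ f, pvRank? e = some i)
    (hrest : ∀ e ∈ rest, pvKey e ≠ i) :
    pvScan (f ++ rest) = pvSec i f ++ pvScan rest := by
  cases f with
  | nil => exact absurd rfl hf
  | cons e t =>
    rw [List.cons_append, pvScan]
    have hki : pvKey e = i := pv_key_of_rank (hfi e (by simp))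
    have htw : (t ++ rest).takeWhile (fun x => pvKey x == i) = t := by
      rw [List.takeWhile_append_of_pos (fun x hx => by
        simp [pv_key_of_rank (hfi x (by simp [hx]))])]
      cases rest with
      | nil => simp
      | cons y r => simp [List.takeWhile_cons]; intro hy; exact absurd hy (hrest y (by simp))
    have hdw : (t ++ rest).dropWhile (fun x => pvKey x == i) = rest := by
      rw [List.dropWhile_append_of_pos (fun x hx => by
        simp [pv_key_of_rank (hfi x (by simp [hx]))])]
      cases rest with
      | nil => simp
      | cons y r => simp [List.dropWhile_cons]; intro hy; exact absurd hy (hrest y (by simp))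
    simp only [hki, htw, hdw, pvSec, List.cons_append]

lemma pv_scan_one (F2 : List (List (String × String))) (h2 : ∀ e ∈ F2, pvRank? e = some 2) :
    pvScan F2 = if F2 = [] then [] else pvSec 2 F2 := by
  by_cases h : F2 = []
  · simp [h, pvScan]
  · have := pv_scan_run F2 [] 2 h h2 (by simp)
    simpa [pvScan, h] using this

lemma pv_scan_two (F1 F2 : List (List (String × String)))
    (h1 : ∀ e ∈ F1, pvRank? e = some 1) (h2 : ∀ e ∈ F2, pvRank? e = some 2) :
    pvScan (F1 ++ F2) = (if F1 = [] then [] else pvSec 1 F1) ++ (if F2 = [] then [] else pvSec 2 F2) := by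
  by_cases h : F1 = []
  · simp [h, pv_scan_one F2 h2]
  · rw [pv_scan_run F1 F2 1 h h1 (fun e he => by rw [pv_key_of_rank (h2 e he)]; omega),
      pv_scan_one F2 h2, if_neg h]

lemma pv_scan_three (F0 F1 F2 : List (List (String × String)))
    (h0 : ∀ e ∈ F0, pvRank? e = some 0) (h1 : ∀ e ∈ F1, pvRank? e = some 1)
    (h2 : ∀ e ∈ F2, pvRank? e = some 2) :
    pvScan (F0 ++ F1 ++ F2) = (if F0 = [] then [] else pvSec 0 F0)
      ++ (if F1 = [] then [] else pvSec 1 F1) ++ (if F2 = [] then [] else pvSec 2 F2) := by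
  rw [List.append_assoc]
  by_cases h : F0 = []
  · simp [h, pv_scan_two F1 F2 h1 h2]
  · rw [pv_scan_run F0 (F1 ++ F2) 0 h h0 (fun e he => by
        rcases List.mem_append.mp he with he | he
        · rw [pv_key_of_rank (h1 e he)]; omega
        · rw [pv_key_of_rank (h2 e he)]; omega),
      pv_scan_two F1 F2 h1 h2, if_neg h]
    simp

-- pvLine, specialised to the three ranks
lemma pv_line0 : pvLine 0 = (fun e => "    - " ++ PySem.Dict.getD (PySem.Dict.mk e) "detail" "?") := by
  funext e; simp [pvLine]

lemma pv_line1 : pvLine 1 = (fun e =>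
    "    - " ++ PySem.Dict.getD (PySem.Dict.mk e) "detail" "?" ++ " " ++ PySem.Dict.getD (PySem.Dict.mk e) "pr_url" "") := by
  funext e; simp [pvLine]

lemma pv_line2 : pvLine 2 = (fun e => "    - " ++ PySem.Dict.getD (PySem.Dict.mk e) "detail" "?") := by
  funext e; simp [pvLine]

-- the rank-indexed header table, evaluated
lemma pv_head0 : (PySem.List.pyGet? pvHead 0).getD "" = "  Auto-fixed: " := by decide
lemma pv_head1 : (PySem.List.pyGet? pvHead 1).getD "" = "  PRs opened: " := by decide
lemma pv_head2 : (PySem.List.pyGet? pvHead 2).getD "" = "  Escalated: " := by decide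

-- ===== VERDICT (by name: the statement is the Claim_ definition above) =====
theorem execution_summary_spec : Claim_equal_execution_summary := by
  intro events _
  unfold Spec_execution_summary execution_summary execution_summary_alt
  by_cases h : events = []
  · simp [h]
  · simp only [if_neg h]
    rw [pv_sorted_groups events]
    have e0 : events.filter (fun e => pvRank? e == some 0)
        = events.filter (fun e => PySem.Dict.get? (PySem.Dict.mk e) "action" == some "auto_fixed") := by
      apply List.filter_congr; intro e _; simpa using (pv_rank0_iff e)
    have e1 : events.filter (fun e => pvRank? e == some 1)
        = events.filter (fun e => PySem.Dict.get? (PySem.Dict.mk e) "action" == some "pr_created") := by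
      apply List.filter_congr; intro e _; simpa using (pv_rank1_iff e)
    have e2 : events.filter (fun e => pvRank? e == some 2)
        = events.filter (fun e => PySem.Dict.get? (PySem.Dict.mk e) "action" == some "escalated") := by
      apply List.filter_congr; intro e _; simpa using (pv_rank2_iff e)
    rw [← e0, ← e1, ← e2]
    have hm0 : ∀ e ∈ events.filter (fun e => pvRank? e == some 0), pvRank? e = some 0 :=
      fun e he => by simpa using (List.mem_filter.mp he).2
    have hm1 : ∀ e ∈ events.filter (fun e => pvRank? e == some 1), pvRank? e = some 1 :=
      fun e he => by simpa using (List.mem_filter.mp he).2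
    have hm2 : ∀ e ∈ events.filter (fun e => pvRank? e == some 2), pvRank? e = some 2 :=
      fun e he => by simpa using (List.mem_filter.mp he).2
    rw [pv_scan_three _ _ _ hm0 hm1 hm2]
    generalize events.filter (fun e => pvRank? e == some 0) = F0 at *
    generalize events.filter (fun e => pvRank? e == some 1) = F1 at *
    generalize events.filter (fun e => pvRank? e == some 2) = F2 at *
    by_cases c0 : F0 = [] <;> by_cases c1 : F1 = [] <;> by_cases c2 : F2 = [] <;>
      simp [c0, c1, c2, pvSec, pv_line0, pv_line1, pv_line2, pv_head0, pv_head1, pv_head2]
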